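-- pv_equiv track=rewrite | github.com/Ayan-Kundu21/Hybrid-AI-Car-Driving-Simulator-_-Minor-Project- | training.py | _actions_match
-- ===== SOURCE A (Python) =====
-- from typing import Dict, List, Optional, Callable
--
-- def _actions_match(action1: Dict[str, bool], action2: Dict[str, bool]) -> bool:
--     # Simple matching - check if main action is the same
--     main_actions = ['accelerate', 'brake', 'turn_left', 'turn_right',
--                    'change_lane_left', 'change_lane_right']
--
--     for action in main_actions:
--         if action1.get(action, False) and action2.get(action, False):
--             return True
--
--     # If both are "do nothing" (no main action)
--     if not any(action1.get(action, False) for action in main_actions) and \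
--        not any(action2.get(action, False) for action in main_actions):
--         return True
--
--     return False
-- ===== SOURCE B (Python) =====
-- def _actions_match(action1, action2):
--     # Encode each dict's set of active main actions as a 6-bit mask, then
--     # compare the two masks: shared bit = shared main action; 0/0 = both idle.
--     bit = {'accelerate': 1, 'brake': 2, 'turn_left': 4, 'turn_right': 8,
--            'change_lane_left': 16, 'change_lane_right': 32}
--     m1 = 0
--     for name, pressed in action1.items():
--         if pressed:
--             m1 |= bit.get(name, 0)
--     m2 = 0
--     for name, pressed in action2.items():
--         if pressed:
--             m2 |= bit.get(name, 0)
--     return (m1 & m2) != 0 or (m1 == 0 and m2 == 0)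
-- ===== Notes on version B (the rewrite author's own statement) =====
-- stated objective: alternative
-- what changed: Instead of scanning the fixed main_actions list with per-action lookups into both dicts, B iterates over each dict's own items once, encodes its active main actions as a 6-bit integer mask, and decides the answer by one bitwise AND plus two zero tests.
import Mathlib
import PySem

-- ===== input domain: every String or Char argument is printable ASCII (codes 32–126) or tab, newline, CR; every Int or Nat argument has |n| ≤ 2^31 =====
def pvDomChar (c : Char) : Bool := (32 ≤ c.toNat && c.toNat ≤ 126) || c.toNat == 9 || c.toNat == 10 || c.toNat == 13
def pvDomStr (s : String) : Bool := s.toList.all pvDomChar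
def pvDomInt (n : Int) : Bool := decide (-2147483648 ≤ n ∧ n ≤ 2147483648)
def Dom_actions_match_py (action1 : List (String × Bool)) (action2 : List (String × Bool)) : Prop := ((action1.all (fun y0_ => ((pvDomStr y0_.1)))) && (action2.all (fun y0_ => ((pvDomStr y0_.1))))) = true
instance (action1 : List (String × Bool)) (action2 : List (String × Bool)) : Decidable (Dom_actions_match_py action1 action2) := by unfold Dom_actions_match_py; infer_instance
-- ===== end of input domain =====

-- B replaces A's scan over the fixed action list with one pass over each dict's own
-- items building a 6-bit activity mask, decided by a bitwise AND; same result, no speed claim.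

-- ===== PORT A =====
-- the six-element main_actions list, constant of the source function
def amMain : List String :=
  ["accelerate", "brake", "turn_left", "turn_right", "change_lane_left", "change_lane_right"]

-- the early-return for-loop of A: on exhaustion, the two any() scans over main_actions
def amGo (a1 a2 : PySem.Dict String Bool) : List String → Bool
  | [] =>
      if !((amMain.any (fun a => a1.getD a false))) && !((amMain.any (fun a => a2.getD a false))) then
        true
      else
        false
  | a :: rest =>
      if a1.getD a false && a2.getD a false then true else amGo a1 a2 rest

def actions_match_py (action1 : List (String × Bool)) (action2 : List (String × Bool)) : Bool :=
  amGo (PySem.Dict.ofList action1) (PySem.Dict.ofList action2) amMain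

-- ===== PORT B =====
-- the 'bit' dict of Source B: each main action's one-bit code
def amBit : PySem.Dict String Nat :=
  PySem.Dict.mk [("accelerate", 1), ("brake", 2), ("turn_left", 4), ("turn_right", 8),
                 ("change_lane_left", 16), ("change_lane_right", 32)]

-- 'm = 0; for name, pressed in d.items(): if pressed: m |= bit.get(name, 0)'
def amMask (d : PySem.Dict String Bool) : Nat :=
  d.items.foldl (fun m kv => if kv.2 then m ||| amBit.getD kv.1 0 else m) 0

def actions_match_py_alt (action1 : List (String × Bool)) (action2 : List (String × Bool)) : Bool :=
  let m1 := amMask (PySem.Dict.ofList action1)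
  let m2 := amMask (PySem.Dict.ofList action2)
  (m1 &&& m2 != 0) || (m1 == 0 && m2 == 0)

-- ===== PRECONDITION & SPEC =====
def Spec_actions_match_py (action1 : List (String × Bool)) (action2 : List (String × Bool)) (out : Bool) : Prop := out = actions_match_py_alt action1 action2
instance (action1 : List (String × Bool)) (action2 : List (String × Bool)) (out : Bool) : Decidable (Spec_actions_match_py action1 action2 out) := by unfold Spec_actions_match_py; infer_instance

-- ===== CLAIM (what is proved, stated in full; the proofs are below) =====
def Claim_equal_actions_match_py : Prop := ∀ (action1 : List (String × Bool)) (action2 : List (String × Bool)), Dom_actions_match_py action1 action2 → Spec_actions_match_py action1 action2 (actions_match_py action1 action2)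

-- ===== LEMMAS AND PROOFS =====

-- the bit dict's lookup sets bit i exactly for the i-th main action
theorem amBit_testBit (k : String) (i : Nat) :
    (amBit.getD k 0).testBit i = decide (i < 6 ∧ amMain.getD i "" = k) := by
  by_cases h6 : i < 6
  · interval_cases i <;>
    · simp only [amBit, amMain, PySem.Dict.getD_eq_get?_getD, PySem.Dict.get?_mk_cons]
      split_ifs <;> simp only [beq_iff_eq] at * <;>
        first
          | (subst_vars; decide)
          | (simp [PySem.Dict.get?]; simp_all)
  · have hle : amBit.getD k 0 ≤ 32 := by
      simp only [amBit, PySem.Dict.getD_eq_get?_getD, PySem.Dict.get?_mk_cons]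
      split_ifs <;> norm_num [PySem.Dict.get?]
    have h2 : (32:Nat) < 2 ^ i :=
      lt_of_lt_of_le (by norm_num) (Nat.pow_le_pow_right (by norm_num) (by omega : 6 ≤ i))
    rw [Nat.testBit_eq_false_of_lt (lt_of_le_of_lt hle h2)]
    simp [h6]

-- bit i of B's or-accumulating loop = bit i of the start value, or some entry contributes it
theorem amMask_fold_testBit (l : List (String × Bool)) (m : Nat) (i : Nat) :
    (l.foldl (fun m kv => if kv.2 then m ||| amBit.getD kv.1 0 else m) m).testBit i =
      (m.testBit i || l.any (fun kv => kv.2 && (amBit.getD kv.1 0).testBit i)) := by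
  induction l generalizing m with
  | nil => simp
  | cons kv rest ih =>
      simp only [List.foldl_cons, List.any_cons, ih]
      by_cases h : kv.2 = true
      · simp [h, Nat.testBit_or, Bool.or_assoc]
      · simp only [Bool.not_eq_true] at h
        simp [h]

-- bit i of the mask = "the i-th main action is active in d"
theorem amMask_testBit (d : PySem.Dict String Bool) (hnd : d.keys.Nodup) (i : Nat) :
    (amMask d).testBit i = decide (i < 6 ∧ d.getD (amMain.getD i "") false = true) := by
  rw [amMask, amMask_fold_testBit]
  simp only [Nat.zero_testBit, Bool.false_or]
  rw [Bool.eq_iff_iff]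
  simp only [List.any_eq_true, Bool.and_eq_true, decide_eq_true_eq, amBit_testBit]
  constructor
  · rintro ⟨kv, hmem, hv, hlt, hk⟩
    refine ⟨hlt, ?_⟩
    have : d.get? kv.1 = some kv.2 := PySem.Dict.get?_of_mem_items d (by simpa using hmem) hnd
    rw [hk]
    simp [PySem.Dict.getD_eq_get?_getD, this, hv]
  · rintro ⟨hlt, hget⟩
    have hget? : d.get? (amMain.getD i "") = some true := by
      rw [PySem.Dict.getD_eq_get?_getD] at hget
      cases h : d.get? (amMain.getD i "") with
      | none => rw [h] at hget; simp at hget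
      | some b => rw [h] at hget; cases b <;> simp_all
    exact ⟨(amMain.getD i "", true), PySem.Dict.mem_items_of_get?_eq_some d hget?,
      rfl, hlt, by simp⟩

theorem mem_amMain_iff (a : String) :
    a ∈ amMain ↔ ∃ i, i < 6 ∧ amMain.getD i "" = a := by
  constructor
  · intro h
    simp only [amMain, List.mem_cons, List.not_mem_nil, or_false] at h
    rcases h with h|h|h|h|h|h
    · exact ⟨0, by omega, h.symm⟩
    · exact ⟨1, by omega, h.symm⟩
    · exact ⟨2, by omega, h.symm⟩
    · exact ⟨3, by omega, h.symm⟩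
    · exact ⟨4, by omega, h.symm⟩
    · exact ⟨5, by omega, h.symm⟩
  · rintro ⟨i, hi, rfl⟩
    interval_cases i <;> decide

-- A's loop over any prefix list l = "some a in l is active in both" or the idle-idle fallback
theorem amGo_eq (a1 a2 : PySem.Dict String Bool) (l : List String) :
    amGo a1 a2 l =
      ((l.any (fun a => a1.getD a false && a2.getD a false)) ||
        (!(amMain.any (fun a => a1.getD a false)) && !(amMain.any (fun a => a2.getD a false)))) := by
  induction l with
  | nil =>
      simp only [amGo, List.any_nil, Bool.false_or]
      split <;> simp_all
  | cons a rest ih =>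
      simp only [amGo, List.any_cons]
      by_cases h : (a1.getD a false && a2.getD a false) = true
      · simp [h]
      · simp only [Bool.not_eq_true] at h
        simp [h, ih]

-- the mask is zero exactly when no main action is active
theorem amMask_eq_zero_iff (d : PySem.Dict String Bool) (hnd : d.keys.Nodup) :
    amMask d = 0 ↔ ∀ a ∈ amMain, ¬ d.getD a false = true := by
  constructor
  · intro h a ha hget
    rcases (mem_amMain_iff a).1 ha with ⟨i, hi, hia⟩
    have := amMask_testBit d hnd i
    rw [h, Nat.zero_testBit, eq_comm, decide_eq_false_iff_not] at this
    exact this ⟨hi, by rw [hia]; exact hget⟩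
  · intro h
    apply Nat.zero_of_testBit_eq_false
    intro i
    rw [amMask_testBit d hnd i, decide_eq_false_iff_not]
    rintro ⟨hi, hget⟩
    exact h _ ((mem_amMain_iff _).2 ⟨i, hi, rfl⟩) hget

theorem am_main_eq (action1 action2 : List (String × Bool)) :
    actions_match_py action1 action2 = actions_match_py_alt action1 action2 := by
  unfold actions_match_py actions_match_py_alt
  set d1 := PySem.Dict.ofList action1 with hd1
  set d2 := PySem.Dict.ofList action2 with hd2
  have h1 : d1.keys.Nodup := PySem.Dict.nodup_keys_ofList action1
  have h2 : d2.keys.Nodup := PySem.Dict.nodup_keys_ofList action2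
  rw [amGo_eq, Bool.eq_iff_iff]
  simp only [bne_iff_ne, ne_eq, beq_iff_eq, Bool.or_eq_true, Bool.and_eq_true,
    Bool.not_eq_true', List.any_eq_false, List.any_eq_true]
  constructor
  · rintro (⟨a, ha, hP, hQ⟩ | ⟨hP, hQ⟩)
    · left
      rcases (mem_amMain_iff a).1 ha with ⟨i, hi, rfl⟩
      intro hz
      have hb : ((amMask d1 &&& amMask d2).testBit i) = false := by
        rw [hz]; exact Nat.zero_testBit i
      rw [Nat.testBit_and, amMask_testBit d1 h1 i, amMask_testBit d2 h2 i] at hb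
      simp only [List.getD] at hP hQ
      simp [hi, hP, hQ] at hb
    · right
      exact ⟨(amMask_eq_zero_iff d1 h1).2 (by simpa using hP),
             (amMask_eq_zero_iff d2 h2).2 (by simpa using hQ)⟩
  · rintro (hz | ⟨hz1, hz2⟩)
    · left
      by_cases hall : ∀ i, ((amMask d1 &&& amMask d2).testBit i) = false
      · exact absurd (Nat.zero_of_testBit_eq_false hall) hz
      · push Not at hall
        obtain ⟨i, hti⟩ := hall
        rw [Bool.ne_false_iff] at hti
        rw [Nat.testBit_and, amMask_testBit d1 h1 i, amMask_testBit d2 h2 i] at hti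
        simp only [Bool.and_eq_true, decide_eq_true_eq] at hti
        obtain ⟨⟨hi, hP⟩, _, hQ⟩ := hti
        exact ⟨amMain.getD i "", (mem_amMain_iff _).2 ⟨i, hi, rfl⟩, hP, hQ⟩
    · right
      constructor <;> intro a ha
      · simpa using (amMask_eq_zero_iff d1 h1).1 hz1 a ha
      · simpa using (amMask_eq_zero_iff d2 h2).1 hz2 a ha

-- ===== VERDICT (by name: the statement is the Claim_ definition above) =====
theorem actions_match_py_spec : Claim_equal_actions_match_py := by
  intro action1 action2 _
  unfold Spec_actions_match_py
  exact am_main_eq action1 action2
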